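-- pv_equiv track=rewrite | github.com/rvhonorato/prot-dna-martini-implementation | scripts/calc-irmsd.py | retrieve_izone
-- ===== SOURCE A (Python) =====
-- from itertools import groupby
-- from operator import itemgetter
--
-- def get_range(data):
--     ranges =[]
--     for k,g in groupby(enumerate(data),lambda x:x[0]-x[1]):
--         group = (map(itemgetter(1),g))
--         group = list(map(int,group))
--         ranges.append((group[0],group[-1]))
--     return ranges
--
-- def retrieve_izone(c_dic, numbering_dic):
--     # based on the reference interface, create izone
--     izone_l = []
--     for chain in c_dic:
--         ref_dic = {}
--         for bound_res in list(c_dic[chain].items())[0][1]: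
--             try:
--                 ub = numbering_dic[chain][bound_res]
--                 ref_dic[bound_res] = ub
--             except:
--                 pass
--
--         # define the bound ranges ex (1-20)
--         for bound_range in get_range(ref_dic.keys()):
--             #  check which is the unbound range that matches
--             unbound_res_l = []
--             for bound_res in range(bound_range[0], bound_range[1]+1):
--                 # unbound_res = ref_dic[bound_res]
--                 unbound_res_l.append(ref_dic[bound_res])
--
--             # use unbound_res_l to build zones
--             for unbound_range in get_range(unbound_res_l):
--                 bound_res_l = []
--                 for unbound_res in range(unbound_range[0],unbound_range[1]+1):
--                     # find what it the bound res that correspond to this unbound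
--                     # bound_res_l.append(find_key(ref_dic, unbound_res))
--                     bound_res_l.append(list(ref_dic.keys())[list(ref_dic.values()).index(unbound_res)])
--                 #
--                 rangeA = get_range(bound_res_l)[0] # bound
--                 rangeB = unbound_range
--                 #
--                 # print chain, rangeA, rangeB
--                 #
--                 izone_str = 'ZONE %s%i-%s%i:%s%i-%s%i' % (chain, rangeA[0], chain, rangeA[1], chain, rangeB[0], chain, rangeB[1])
--                 izone_l.append(izone_str)
--
--     return izone_l
-- ===== SOURCE B (Python) =====
-- def _zone(chain, inv, v0, v1):
--     # resolve the bound range for unbound run [v0, v1] via the inverse map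
--     a0 = a1 = inv[v0]
--     v = v0 + 1
--     while v <= v1 and inv[v] == a1 + 1:
--         a1 = inv[v]
--         v += 1
--     return 'ZONE %s%i-%s%i:%s%i-%s%i' % (chain, a0, chain, a1, chain, v0, chain, v1)
--
--
-- def retrieve_izone(c_dic, numbering_dic):
--     izone_l = []
--     for chain in c_dic:
--         residues = list(c_dic[chain].items())[0][1]
--         num = numbering_dic.get(chain, {})
--         ref = {}
--         for r in residues:
--             if r in num:
--                 ref[r] = num[r]
--         # inverse map: unbound value -> first bound residue carrying it
--         inv = {}
--         for k, v in ref.items():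
--             if v not in inv:
--                 inv[v] = k
--         # single linear scan over ref items: close a run whenever either the
--         # bound or the unbound residue is not exactly +1 of its predecessor
--         v0 = pk = pv = None
--         for k, v in ref.items():
--             if pk is not None and k == pk + 1 and v == pv + 1:
--                 pk, pv = k, v
--             else:
--                 if pk is not None:
--                     izone_l.append(_zone(chain, inv, v0, pv))
--                 v0, pk, pv = v, k, v
--         if pk is not None:
--             izone_l.append(_zone(chain, inv, v0, pv))
--     return izone_l
-- ===== Notes on version B (the rewrite author's own statement) =====
-- stated objective: alternative
-- what changed: Replaces the nested get_range passes and the repeated list(ref_dic.keys())[list(ref_dic.values()).index(v)] scans with one inverse dict (unbound value -> first bound residue) and a single linear scan over ref_dic items that closes a run whenever the bound or unbound residue is not +1 of its predecessor.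
import Mathlib
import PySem

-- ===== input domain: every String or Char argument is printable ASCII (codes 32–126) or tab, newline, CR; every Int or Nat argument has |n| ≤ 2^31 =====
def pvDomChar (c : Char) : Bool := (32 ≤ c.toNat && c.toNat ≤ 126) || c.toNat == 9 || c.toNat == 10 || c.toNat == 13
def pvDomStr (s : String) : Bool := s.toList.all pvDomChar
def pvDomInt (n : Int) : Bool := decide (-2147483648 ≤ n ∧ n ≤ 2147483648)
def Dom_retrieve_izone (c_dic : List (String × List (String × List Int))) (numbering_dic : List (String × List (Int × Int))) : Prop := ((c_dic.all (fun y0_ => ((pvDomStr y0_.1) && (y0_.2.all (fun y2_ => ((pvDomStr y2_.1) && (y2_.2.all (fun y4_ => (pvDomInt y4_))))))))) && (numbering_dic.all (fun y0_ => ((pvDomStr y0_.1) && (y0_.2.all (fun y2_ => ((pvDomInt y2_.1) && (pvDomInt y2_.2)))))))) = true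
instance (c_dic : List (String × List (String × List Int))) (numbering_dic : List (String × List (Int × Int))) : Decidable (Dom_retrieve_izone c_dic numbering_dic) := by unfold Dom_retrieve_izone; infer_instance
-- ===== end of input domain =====

-- B replaces A's nested get_range passes and repeated list .index scans by one inverse
-- dict plus a single linear scan over ref_dic items (alternative algorithm, same results).

-- ===== PORT A =====
-- itertools.groupby(enumerate(data), i - v) groups maximal runs of consecutive values:
-- pvRunsCore/pvRuns compute those groups; get_range then records (group[0], group[-1]).
def pvRunsCore {α : Type} (p : α → α → Bool) : α → List α → List α × List (List α)
  | x, [] => ([x], [])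
  | x, y :: ys =>
    let r := pvRunsCore p y ys
    if p x y then (x :: r.1, r.2) else ([x], r.1 :: r.2)

def pvRuns {α : Type} (p : α → α → Bool) : List α → List (List α)
  | [] => []
  | x :: xs => (pvRunsCore p x xs).1 :: (pvRunsCore p x xs).2

def get_range (data : List Int) : List (Int × Int) :=
  (pvRuns (fun a b => b == a + 1) data).map (fun g => (g.headD 0, g.getLastD 0))

-- 'ZONE %s%i-%s%i:%s%i-%s%i' % (chain, a0, chain, a1, chain, b0, chain, b1) — identical in A and B
def pvMkZone (chain : String) (a0 a1 b0 b1 : Int) : String :=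
  "ZONE " ++ chain ++ PySem.Int.toStr a0 ++ "-" ++ chain ++ PySem.Int.toStr a1 ++ ":" ++ chain ++ PySem.Int.toStr b0 ++ "-" ++ chain ++ PySem.Int.toStr b1

-- ref_dic = {}; for bound_res in residues: try ref_dic[bound_res] = numbering_dic[chain][bound_res] except: pass
def pvRefA (numbering_dic : List (String × List (Int × Int))) (chain : String) (residues : List Int) : PySem.Dict Int Int :=
  residues.foldl (fun d r =>
    match (PySem.Dict.mk numbering_dic).get? chain with
    | none => d
    | some nd =>
      match (PySem.Dict.mk nd).get? r with
      | none => d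
      | some ub => d.insert r ub) PySem.Dict.empty

-- list(ref_dic.keys())[list(ref_dic.values()).index(v)]; the none arm is Python's ValueError, unreachable here (v is drawn from ref_dic.values())
def pvResolveA (ref : PySem.Dict Int Int) (v : Int) : Int :=
  match PySem.List.index? ref.values v with
  | some i => (ref.keys).getD i 0
  | none => 0

def pvZonesA (chain : String) (ref : PySem.Dict Int Int) (acc : List String) : List String :=
  (get_range ref.keys).foldl (fun acc1 br =>
    let unbound_res_l := (PySem.List.pyRange br.1 (br.2 + 1) 1).foldl (fun l k => l ++ [ref.getD k 0]) []
    (get_range unbound_res_l).foldl (fun acc2 ur =>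
      let bound_res_l := (PySem.List.pyRange ur.1 (ur.2 + 1) 1).foldl (fun l v => l ++ [pvResolveA ref v]) []
      let rangeA := (get_range bound_res_l).getD 0 (0, 0)
      acc2 ++ [pvMkZone chain rangeA.1 rangeA.2 ur.1 ur.2]) acc1) acc

-- list(c_dic[chain].items())[0][1]: the [0] of the (per Pre_ nonempty) inner dict, totalized with pyGetD
def retrieve_izone (c_dic : List (String × List (String × List Int))) (numbering_dic : List (String × List (Int × Int))) : List String :=
  c_dic.foldl (fun izone_l cp =>
    pvZonesA cp.1 (pvRefA numbering_dic cp.1 (PySem.List.pyGetD cp.2 0 ("", [])).2) izone_l) []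

-- ===== PORT B =====
def pvRefB (num : List (Int × Int)) (residues : List Int) : PySem.Dict Int Int :=
  residues.foldl (fun d r =>
    match (PySem.Dict.mk num).get? r with
    | none => d
    | some v => d.insert r v) PySem.Dict.empty

-- inv = {}; for k, v in ref.items(): if v not in inv: inv[v] = k
def pvInv (ref : PySem.Dict Int Int) : PySem.Dict Int Int :=
  ref.items.foldl (fun d p => if d.contains p.2 then d else d.insert p.2 p.1) PySem.Dict.empty

-- the while loop of _zone; fuel (v1 - v0).toNat bounds 'v <= v1' exactly (v starts at v0+1, +1 each turn)
def pvWalk (inv : PySem.Dict Int Int) : Nat → Int → Int → Int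
  | 0, _, a1 => a1
  | n + 1, v, a1 => if inv.getD v 0 == a1 + 1 then pvWalk inv n (v + 1) (inv.getD v 0) else a1

def pvZoneB (chain : String) (inv : PySem.Dict Int Int) (v0 v1 : Int) : String :=
  let a0 := inv.getD v0 0
  pvMkZone chain a0 (pvWalk inv (v1 - v0).toNat (v0 + 1) a0) v0 v1

-- the scan loop with state (v0, pk, pv) = run-start unbound value, previous bound, previous unbound
def pvSegB (chain : String) (inv : PySem.Dict Int Int) : Int → Int → Int → List (Int × Int) → List String
  | v0, _, pv, [] => [pvZoneB chain inv v0 pv]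
  | v0, pk, pv, (k, v) :: rest =>
    if k == pk + 1 && v == pv + 1 then pvSegB chain inv v0 k v rest
    else pvZoneB chain inv v0 pv :: pvSegB chain inv v k v rest

def pvZonesB (chain : String) (ref : PySem.Dict Int Int) : List String :=
  match ref.items with
  | [] => []
  | (k, v) :: rest => pvSegB chain (pvInv ref) v k v rest

def retrieve_izone_alt (c_dic : List (String × List (String × List Int))) (numbering_dic : List (String × List (Int × Int))) : List String :=
  c_dic.foldl (fun izone_l cp =>
    let residues := (PySem.List.pyGetD cp.2 0 ("", [])).2
    let num := ((PySem.Dict.mk numbering_dic).get? cp.1).getD []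
    izone_l ++ pvZonesB cp.1 (pvRefB num residues)) []

-- ===== PRECONDITION & SPEC =====
-- Pre_ excludes exactly the inputs where some chain's inner dict is empty: there
-- list(c_dic[chain].items())[0] raises IndexError in Python A (and in B alike).
def Pre_retrieve_izone (c_dic : List (String × List (String × List Int))) (numbering_dic : List (String × List (Int × Int))) : Prop :=
  ∀ p ∈ c_dic, p.2 ≠ []
instance (c_dic : List (String × List (String × List Int))) (numbering_dic : List (String × List (Int × Int))) : Decidable (Pre_retrieve_izone c_dic numbering_dic) := by unfold Pre_retrieve_izone; infer_instance

def pvWitness_retrieve_izone : (List (String × List (String × List Int))) × (List (String × List (Int × Int))) :=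
  ([("A", [("x", [1, 2, 3, 7])])], [("A", [(1, 5), (2, 6), (3, 7), (7, 9)])])

def Spec_retrieve_izone (c_dic : List (String × List (String × List Int))) (numbering_dic : List (String × List (Int × Int))) (out : List String) : Prop := out = retrieve_izone_alt c_dic numbering_dic
instance (c_dic : List (String × List (String × List Int))) (numbering_dic : List (String × List (Int × Int))) (out : List String) : Decidable (Spec_retrieve_izone c_dic numbering_dic out) := by unfold Spec_retrieve_izone; infer_instance

-- ===== CLAIM (what is proved, stated in full; the proofs are below) =====
def Claim_equal_retrieve_izone : Prop := ∀ (c_dic : List (String × List (String × List Int))) (numbering_dic : List (String × List (Int × Int))), Dom_retrieve_izone c_dic numbering_dic → Pre_retrieve_izone c_dic numbering_dic → Spec_retrieve_izone c_dic numbering_dic (retrieve_izone c_dic numbering_dic)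

-- ===== LEMMAS AND PROOFS =====


-- ---- proof-only helpers ----
def pvStepF (a b : Int × Int) : Bool := b.1 == a.1 + 1
def pvStepV (a b : Int × Int) : Bool := b.2 == a.2 + 1
def pvLock (a b : Int × Int) : Bool := pvStepF a b && pvStepV a b
def pvFkey (L : List (Int × Int)) (x : Int) : Int := ((L.find? (fun p => p.2 == x)).map Prod.fst).getD 0
def pvFre (prev : Int) : List Int → Int
  | [] => prev
  | y :: ys => if y == prev + 1 then pvFre y ys else prev

-- ---- pvRuns structure lemmas ----
theorem pvCore1_cons {α : Type} (p : α → α → Bool) (x : α) (xs : List α) :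
    ∃ t, (pvRunsCore p x xs).1 = x :: t := by
  cases xs with
  | nil => exact ⟨[], rfl⟩
  | cons y ys =>
    simp only [pvRunsCore]
    split
    · exact ⟨_, rfl⟩
    · exact ⟨[], rfl⟩

theorem pvCore_fst_prefix {α : Type} (p : α → α → Bool) :
    ∀ (xs : List α) (x : α), (pvRunsCore p x xs).1 <+: (x :: xs) := by
  intro xs
  induction xs with
  | nil => intro x; simp [pvRunsCore]
  | cons y ys ih =>
    intro x
    simp only [pvRunsCore]
    split
    · exact (List.prefix_cons_inj x).mpr (ih y)
    · simp

theorem pvCore_snd_infix {α : Type} (p : α → α → Bool) :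
    ∀ (xs : List α) (x : α) (g : List α), g ∈ (pvRunsCore p x xs).2 → g <:+: (x :: xs) := by
  intro xs
  induction xs with
  | nil => intro x g h; simp [pvRunsCore] at h
  | cons y ys ih =>
    intro x g h
    simp only [pvRunsCore] at h
    split at h
    · exact (ih y g h).trans (List.infix_cons (List.infix_refl _))
    · rcases List.mem_cons.mp h with h1 | h1
      · subst h1
        exact ((pvCore_fst_prefix p ys y).isInfix).trans (List.infix_cons (List.infix_refl _))
      · exact (ih y g h1).trans (List.infix_cons (List.infix_refl _))

theorem pvRuns_mem_infix {α : Type} (p : α → α → Bool) (l : List α) (g : List α)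
    (h : g ∈ pvRuns p l) : g <:+: l := by
  cases l with
  | nil => simp [pvRuns] at h
  | cons x xs =>
    simp only [pvRuns] at h
    rcases List.mem_cons.mp h with h1 | h1
    · subst h1; exact (pvCore_fst_prefix p xs x).isInfix
    · exact pvCore_snd_infix p xs x g h1

theorem pvCore_snd_ne_nil {α : Type} (p : α → α → Bool) :
    ∀ (xs : List α) (x : α) (g : List α), g ∈ (pvRunsCore p x xs).2 → g ≠ [] := by
  intro xs
  induction xs with
  | nil => intro x g h; simp [pvRunsCore] at h
  | cons y ys ih =>
    intro x g h
    simp only [pvRunsCore] at h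
    split at h
    · exact ih y g h
    · rcases List.mem_cons.mp h with h1 | h1
      · subst h1
        obtain ⟨t, ht⟩ := pvCore1_cons p y ys
        simp [ht]
      · exact ih y g h1

theorem pvRuns_ne_nil {α : Type} (p : α → α → Bool) (l : List α) (g : List α)
    (h : g ∈ pvRuns p l) : g ≠ [] := by
  cases l with
  | nil => simp [pvRuns] at h
  | cons x xs =>
    rcases List.mem_cons.mp h with h1 | h1
    · subst h1
      obtain ⟨t, ht⟩ := pvCore1_cons p x xs
      simp [ht]
    · exact pvCore_snd_ne_nil p xs x g h1

theorem pvCore_fst_chain {α : Type} (p : α → α → Bool) :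
    ∀ (xs : List α) (x : α), List.IsChain (fun a b => p a b = true) (pvRunsCore p x xs).1 := by
  intro xs
  induction xs with
  | nil => intro x; simp [pvRunsCore]
  | cons y ys ih =>
    intro x
    simp only [pvRunsCore]
    split
    · obtain ⟨t, ht⟩ := pvCore1_cons p y ys
      have h2 := ih y
      rw [ht] at h2 ⊢
      exact List.IsChain.cons_cons (by assumption) h2
    · simp

theorem pvCore_snd_chain {α : Type} (p : α → α → Bool) :
    ∀ (xs : List α) (x : α) (g : List α), g ∈ (pvRunsCore p x xs).2 →
      List.IsChain (fun a b => p a b = true) g := by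
  intro xs
  induction xs with
  | nil => intro x g h; simp [pvRunsCore] at h
  | cons y ys ih =>
    intro x g h
    simp only [pvRunsCore] at h
    split at h
    · exact ih y g h
    · rcases List.mem_cons.mp h with h1 | h1
      · subst h1; exact pvCore_fst_chain p ys y
      · exact ih y g h1

theorem pvRuns_chain {α : Type} (p : α → α → Bool) (l : List α) (g : List α)
    (h : g ∈ pvRuns p l) : List.IsChain (fun a b => p a b = true) g := by
  cases l with
  | nil => simp [pvRuns] at h
  | cons x xs =>
    rcases List.mem_cons.mp h with h1 | h1
    · subst h1; exact pvCore_fst_chain p xs x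
    · exact pvCore_snd_chain p xs x g h1
theorem pvCore_map {α β : Type} (q : β → β → Bool) (f : α → β) :
    ∀ (xs : List α) (x : α),
      pvRunsCore q (f x) (xs.map f) =
        (((pvRunsCore (fun a b => q (f a) (f b)) x xs).1.map f),
         ((pvRunsCore (fun a b => q (f a) (f b)) x xs).2.map (List.map f))) := by
  intro xs
  induction xs with
  | nil => intro x; simp [pvRunsCore]
  | cons y ys ih =>
    intro x
    simp only [List.map_cons, pvRunsCore, ih y]
    by_cases h : q (f x) (f y) = true <;> simp [h]

theorem pvRuns_map {α β : Type} (q : β → β → Bool) (f : α → β) (l : List α) :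
    pvRuns q (l.map f) = (pvRuns (fun a b => q (f a) (f b)) l).map (List.map f) := by
  cases l with
  | nil => simp [pvRuns]
  | cons x xs => simp [pvRuns, pvCore_map q f xs x]

theorem pvRuns_cons {α : Type} (p : α → α → Bool) (x : α) (xs : List α) :
    pvRuns p (x :: xs) = (pvRunsCore p x xs).1 :: (pvRunsCore p x xs).2 := rfl

theorem pvCore_cons {α : Type} (p : α → α → Bool) (x y : α) (ys : List α) :
    pvRunsCore p x (y :: ys) =
      if p x y then (x :: (pvRunsCore p y ys).1, (pvRunsCore p y ys).2)
      else ([x], (pvRunsCore p y ys).1 :: (pvRunsCore p y ys).2) := rfl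

theorem pvCore_refine {α : Type} (pk pv : α → α → Bool) :
    ∀ (xs : List α) (x : α),
      pvRuns pv (pvRunsCore pk x xs).1 ++ ((pvRunsCore pk x xs).2).flatMap (pvRuns pv) =
        (pvRunsCore (fun a b => pk a b && pv a b) x xs).1
          :: (pvRunsCore (fun a b => pk a b && pv a b) x xs).2 := by
  intro xs
  induction xs with
  | nil => intro x; simp [pvRuns, pvRunsCore]
  | cons y ys ih =>
    intro x
    obtain ⟨t, ht⟩ := pvCore1_cons pk y ys
    have hih := ih y
    by_cases hk : pk x y = true
    · by_cases hv : pv x y = true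
      · rw [pvCore_cons pk, if_pos hk, pvCore_cons (fun a b => pk a b && pv a b),
          if_pos (by simp [hk, hv])]
        rw [ht] at hih ⊢
        rw [pvRuns_cons] at hih
        rw [List.cons_append] at hih
        have h1 : (pvRunsCore pv y t).1 = (pvRunsCore (fun a b => pk a b && pv a b) y ys).1 := by
          injection hih
        have h2 : (pvRunsCore pv y t).2 ++ ((pvRunsCore pk y ys).2).flatMap (pvRuns pv) =
            (pvRunsCore (fun a b => pk a b && pv a b) y ys).2 := by
          injection hih
        show pvRuns pv (x :: y :: t) ++ ((pvRunsCore pk y ys).2).flatMap (pvRuns pv) = _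
        rw [pvRuns_cons, pvCore_cons pv, if_pos hv]
        simp only [List.cons_append]
        rw [h1, h2]
      · rw [pvCore_cons pk, if_pos hk, pvCore_cons (fun a b => pk a b && pv a b),
          if_neg (by simp [hv])]
        rw [ht] at hih ⊢
        rw [pvRuns_cons] at hih
        rw [List.cons_append] at hih
        show pvRuns pv (x :: y :: t) ++ ((pvRunsCore pk y ys).2).flatMap (pvRuns pv) = _
        rw [pvRuns_cons, pvCore_cons pv, if_neg (by simp [hv])]
        simp only [List.cons_append]
        rw [hih]
    · rw [pvCore_cons pk, if_neg (by simp [hk]), pvCore_cons (fun a b => pk a b && pv a b),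
        if_neg (by simp [hk])]
      simp only [List.flatMap_cons]
      show pvRuns pv [x] ++ (pvRuns pv (pvRunsCore pk y ys).1
          ++ ((pvRunsCore pk y ys).2).flatMap (pvRuns pv)) = _
      rw [hih]
      rfl

theorem pvRuns_refine {α : Type} (pk pv : α → α → Bool) (l : List α) :
    (pvRuns pk l).flatMap (pvRuns pv) = pvRuns (fun a b => pk a b && pv a b) l := by
  cases l with
  | nil => simp [pvRuns]
  | cons x xs =>
    rw [pvRuns_cons, List.flatMap_cons, pvRuns_cons, ← pvCore_refine pk pv xs x]
-- a +1-chained list is the Python range from its head to its last element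
theorem pvChain_pyRange : ∀ (l : List Int) (x : Int),
    List.IsChain (fun a b => (b == a + 1) = true) (x :: l) →
    PySem.List.pyRange x ((x :: l).getLastD 0 + 1) 1 = x :: l := by
  intro l
  induction l with
  | nil =>
    intro x _
    simp [PySem.List.pyRange_one_singleton]
  | cons y ys ih =>
    intro x hc
    have hxy : y = x + 1 := by simpa using (List.isChain_cons_cons.mp hc).1
    have hc2 : List.IsChain (fun a b => (b == a + 1) = true) (y :: ys) :=
      (List.isChain_cons_cons.mp hc).2
    have hih := ih y hc2
    have hlast : ((x :: y :: ys).getLastD 0) = ((y :: ys).getLastD 0) := by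
      simp
    have hy_mem : y ∈ PySem.List.pyRange y ((y :: ys).getLastD 0 + 1) 1 := by
      rw [hih]; exact List.mem_cons_self
    have hy_le : y ≤ (y :: ys).getLastD 0 := by
      have := (PySem.List.mem_pyRange_one).mp hy_mem
      omega
    rw [hlast]
    rw [PySem.List.pyRange_one_cons (by omega)]
    rw [hxy] at hih ⊢
    rw [hih]

-- head ≤ last for a +1-chained list
theorem pvChain_head_le_last (l : List Int) (x : Int)
    (hc : List.IsChain (fun a b => (b == a + 1) = true) (x :: l)) :
    x ≤ (x :: l).getLastD 0 := by
  have h := pvChain_pyRange l x hc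
  have : x ∈ PySem.List.pyRange x ((x :: l).getLastD 0 + 1) 1 := by
    rw [h]; exact List.mem_cons_self
  have := (PySem.List.mem_pyRange_one).mp this
  omega

-- last element of the first run = pvFre
theorem pvCore1_getLastD : ∀ (xs : List Int) (x : Int),
    ((pvRunsCore (fun a b => b == a + 1) x xs).1.getLastD 0) = pvFre x xs := by
  intro xs
  induction xs with
  | nil => intro x; simp [pvRunsCore, pvFre]
  | cons y ys ih =>
    intro x
    rw [pvCore_cons, pvFre]
    by_cases h : (y == x + 1) = true
    · rw [if_pos h, if_pos h]
      obtain ⟨t, ht⟩ := pvCore1_cons (fun a b => b == a + 1) y ys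
      have := ih y
      rw [ht] at this ⊢
      simpa [List.getLastD_cons] using this
    · rw [if_neg h, if_neg h]
      simp

-- (get_range (x :: xs))[0] = (x, pvFre x xs)
theorem pvGetRange_head (x : Int) (xs : List Int) :
    (get_range (x :: xs)).getD 0 (0, 0) = (x, pvFre x xs) := by
  unfold get_range
  rw [pvRuns_cons]
  obtain ⟨t, ht⟩ := pvCore1_cons (fun a b => b == a + 1) x xs
  have hl := pvCore1_getLastD xs x
  rw [List.map_cons]
  simp only [List.getD_cons_zero]
  rw [ht] at hl ⊢
  simp only [List.headD_cons]
  rw [← hl]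

-- pvWalk computes pvFre over the looked-up range
theorem pvWalk_eq_fre (inv : PySem.Dict Int Int) :
    ∀ (n : Nat) (v a : Int),
      pvWalk inv n v a =
        pvFre a ((PySem.List.pyRange v (v + n) 1).map (fun u => inv.getD u 0)) := by
  intro n
  induction n with
  | zero =>
    intro v a
    rw [pvWalk]
    rw [PySem.List.pyRange_one_eq_nil (by omega)]
    rfl
  | succ m ih =>
    intro v a
    rw [pvWalk]
    rw [PySem.List.pyRange_one_cons (by omega), List.map_cons, pvFre]
    have harr : (v + 1) + (m : Int) = v + ((m : Int) + 1) := by ring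
    by_cases h : (inv.getD v 0 == a + 1) = true
    · rw [if_pos h, if_pos h, ih (v + 1) (inv.getD v 0), harr]
      norm_num
    · rw [if_neg h, if_neg h]
-- A's keys[values.index(v)] is the first key carrying value v
theorem pvResolve_list_eq_fkey : ∀ (L : List (Int × Int)) (x : Int),
    (match PySem.List.index? (L.map Prod.snd) x with
     | some i => (L.map Prod.fst).getD i 0
     | none => 0) = pvFkey L x := by
  intro L
  induction L with
  | nil => intro x; simp [pvFkey]
  | cons p L ih =>
    intro x
    by_cases h : p.2 = x
    · subst h
      rw [List.map_cons, PySem.List.index?_cons_self]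
      simp [pvFkey]
    · rw [List.map_cons, PySem.List.index?_cons_of_ne _ (by omega)]
      have hfk : pvFkey (p :: L) x = pvFkey L x := by
        simp [pvFkey, List.find?_cons_of_neg, h]
      rw [hfk, ← ih x]
      cases hidx : PySem.List.index? (L.map Prod.snd) x with
      | none => simp
      | some i => simp

theorem pvResolve_eq_fkey (ref : PySem.Dict Int Int) (x : Int) :
    pvResolveA ref x = pvFkey ref.items x := by
  unfold pvResolveA
  exact pvResolve_list_eq_fkey ref.items x

-- the first-wins inverse-building fold
theorem pvInv_fold_get? : ∀ (L : List (Int × Int)) (d : PySem.Dict Int Int) (x : Int),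
    ((L.foldl (fun d p => if d.contains p.2 then d else d.insert p.2 p.1) d).get? x) =
      ((d.get? x).or (((L.find? (fun p => p.2 == x)).map Prod.fst))) := by
  intro L
  induction L with
  | nil => intro d x; cases h : d.get? x <;> simp [h]
  | cons p L ih =>
    intro d x
    rw [List.foldl_cons]
    by_cases hc : d.contains p.2 = true
    · rw [if_pos hc, ih d x]
      by_cases h : p.2 = x
      · subst h
        have : (d.get? p.2).isSome := by
          rw [← PySem.Dict.contains_eq_isSome_get?]; exact hc
        cases hd : d.get? p.2 with
        | none => rw [hd] at this; simp at this
        | some w => simp [Option.or]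
      · rw [List.find?_cons_of_neg (by simp [h])]
    · rw [if_neg (by simp [hc]), ih (d.insert p.2 p.1) x]
      have hdx : d.get? p.2 = none := by
        have : (d.get? p.2).isSome = false := by
          rw [← PySem.Dict.contains_eq_isSome_get?]; simpa using hc
        cases hd : d.get? p.2 with
        | none => rfl
        | some w => rw [hd] at this; simp at this
      rw [PySem.Dict.get?_insert]
      by_cases h : x = p.2
      · subst h
        rw [if_pos rfl, hdx, List.find?_cons_of_pos (by simp)]
        simp [Option.or]
      · rw [if_neg h, List.find?_cons_of_neg (by simp; omega)]

theorem pvInv_getD_eq_fkey (ref : PySem.Dict Int Int) (x : Int) :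
    (pvInv ref).getD x 0 = pvFkey ref.items x := by
  unfold pvInv
  rw [PySem.Dict.getD_eq_get?_getD, pvInv_fold_get? ref.items PySem.Dict.empty x,
    PySem.Dict.get?_empty]
  simp [pvFkey, Option.or]

-- keys of the A/B-built ref dict have no duplicates
theorem pvRefB_fold_nodup (num : List (Int × Int)) :
    ∀ (residues : List Int) (d : PySem.Dict Int Int), d.keys.Nodup →
      ((residues.foldl (fun d r =>
        match (PySem.Dict.mk num).get? r with
        | none => d
        | some v => d.insert r v) d).keys).Nodup := by
  intro residues
  induction residues with
  | nil => intro d h; exact h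
  | cons r rs ih =>
    intro d h
    rw [List.foldl_cons]
    cases hg : (PySem.Dict.mk num).get? r with
    | none => exact ih d h
    | some v => exact ih _ (PySem.Dict.nodup_keys_insert _ _ _ h)

theorem pvRefB_nodup (num : List (Int × Int)) (residues : List Int) :
    ((pvRefB num residues).keys).Nodup := by
  unfold pvRefB
  exact pvRefB_fold_nodup num residues PySem.Dict.empty (PySem.Dict.nodup_keys_empty)

-- A and B build the same ref dict
theorem pvRefA_eq_refB (numbering_dic : List (String × List (Int × Int))) (chain : String)
    (residues : List Int) :
    pvRefA numbering_dic chain residues =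
      pvRefB (((PySem.Dict.mk numbering_dic).get? chain).getD []) residues := by
  unfold pvRefA pvRefB
  cases h : (PySem.Dict.mk numbering_dic).get? chain with
  | none =>
    simp only [Option.getD_none]
    induction residues with
    | nil => rfl
    | cons r rs ih =>
      rw [List.foldl_cons, List.foldl_cons]
      have : (PySem.Dict.mk ([] : List (Int × Int))).get? r = none := rfl
      rw [this]
      exact ih
  | some nd => simp only [Option.getD_some]
-- A's inner zone for one unbound range ur, as a function of ur
def pvZA (ref : PySem.Dict Int Int) (chain : String) (ur : Int × Int) : String :=
  let R := (get_range ((PySem.List.pyRange ur.1 (ur.2 + 1) 1).map (pvResolveA ref))).getD 0 (0, 0)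
  pvMkZone chain R.1 R.2 ur.1 ur.2

theorem pvGet_range_eq (l : List Int) :
    get_range l = (pvRuns (fun a b => b == a + 1) l).map (fun g => (g.headD 0, g.getLastD 0)) := rfl

theorem pvZonesA_flat (chain : String) (ref : PySem.Dict Int Int) (acc : List String) :
    pvZonesA chain ref acc = acc ++ (get_range ref.keys).flatMap (fun br =>
      (get_range ((PySem.List.pyRange br.1 (br.2 + 1) 1).map (fun k => ref.getD k 0))).flatMap
        (fun ur => [pvZA ref chain ur])) := by
  unfold pvZonesA pvZA
  simp only [PySem.List.foldl_append_singleton_eq_map, List.nil_append,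
    PySem.List.foldl_append_eq_flatMap, ← List.map_eq_flatMap]

theorem pvLastD_map_snd : ∀ (T : List (Int × Int)) (t : Int × Int),
    ((t :: T).map Prod.snd).getLastD 0 = ((t :: T).getLastD (0, 0)).2 := by
  intro T
  induction T with
  | nil => intro t; rfl
  | cons u T ih => intro t; simpa using ih u

theorem pvInv_getD_eq_resolve (ref : PySem.Dict Int Int) (v : Int) :
    (pvInv ref).getD v 0 = pvResolveA ref v := by
  rw [pvInv_getD_eq_fkey, ← pvResolve_eq_fkey]

-- per key-run: the dict-reconstructed unbound list is the run's own value list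
theorem pvBodyA_eq (ref : PySem.Dict Int Int) (hnd : ref.keys.Nodup) (chain : String) :
    ∀ S ∈ pvRuns (fun a b : Int × Int => b.1 == a.1 + 1) ref.items,
      (get_range ((PySem.List.pyRange ((S.map Prod.fst).headD 0)
          ((S.map Prod.fst).getLastD 0 + 1) 1).map (fun k => ref.getD k 0))).flatMap
        (fun ur => [pvZA ref chain ur])
      = (get_range (S.map Prod.snd)).flatMap (fun ur => [pvZA ref chain ur]) := by
  intro S hS
  obtain ⟨s, S', rfl⟩ := List.ne_nil_iff_exists_cons.mp (pvRuns_ne_nil _ _ _ hS)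
  have hch := pvRuns_chain _ _ _ hS
  have hchm : List.IsChain (fun a b : Int => (b == a + 1) = true) ((s :: S').map Prod.fst) :=
    List.isChain_map_of_isChain Prod.fst (fun a b h => h) hch
  have hpr := pvChain_pyRange (S'.map Prod.fst) s.1 (by simpa using hchm)
  simp only [List.map_cons, List.headD_cons]
  rw [hpr]
  have hback : (s.1 :: S'.map Prod.fst) = (s :: S').map Prod.fst := rfl
  rw [hback, List.map_map]
  have hmem : ∀ p ∈ (s :: S'), ((fun k => ref.getD k 0) ∘ Prod.fst) p = Prod.snd p := by
    intro p hp
    have hpL : p ∈ ref.items := ((pvRuns_mem_infix _ _ _ hS).sublist).subset hp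
    have : (p.1, p.2) ∈ ref.items := by simpa using hpL
    simpa using PySem.Dict.getD_of_mem_items ref this hnd 0
  rw [List.map_congr_left hmem]
  simp only [List.map_cons]

-- per lockstep run: A's zone equals B's zone
theorem pvZoneEq (ref : PySem.Dict Int Int) (chain : String) :
    ∀ T ∈ pvRuns pvLock ref.items,
      pvZA ref chain (((T.map Prod.snd).headD 0), ((T.map Prod.snd).getLastD 0)) =
        pvZoneB chain (pvInv ref) ((T.headD (0, 0)).2) ((T.getLastD (0, 0)).2) := by
  intro T hT
  obtain ⟨t, T', rfl⟩ := List.ne_nil_iff_exists_cons.mp (pvRuns_ne_nil _ _ _ hT)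
  have hch := pvRuns_chain _ _ _ hT
  have hmod : List.IsChain (fun a b : Int × Int => (b.2 == a.2 + 1) = true) (t :: T') :=
    hch.imp (fun {a b} h => by
      simp only [pvLock, pvStepF, pvStepV, Bool.and_eq_true] at h
      exact h.2)
  have hchv : List.IsChain (fun a b : Int => (b == a + 1) = true) ((t :: T').map Prod.snd) :=
    List.isChain_map_of_isChain (S := fun a b : Int => (b == a + 1) = true) Prod.snd
      (fun a b h => h) hmod
  simp only [List.map_cons] at hchv
  simp only [List.map_cons, List.headD_cons]
  rw [← pvLastD_map_snd T' t]
  simp only [List.map_cons]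
  set lastv := (t.2 :: T'.map Prod.snd).getLastD 0 with hlastv
  have hpr := pvChain_pyRange (T'.map Prod.snd) t.2 hchv
  rw [← hlastv] at hpr
  have hle : t.2 ≤ lastv := by
    have := pvChain_head_le_last (T'.map Prod.snd) t.2 hchv
    rw [← hlastv] at this; exact this
  unfold pvZA pvZoneB
  rw [hpr]
  simp only [List.map_cons]
  rw [pvGetRange_head]
  have hfuel : (t.2 + 1) + ((lastv - t.2).toNat : Int) = lastv + 1 := by omega
  rw [pvWalk_eq_fre (pvInv ref) (lastv - t.2).toNat (t.2 + 1), hfuel]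
  have h2 : PySem.List.pyRange t.2 (lastv + 1) 1 =
      t.2 :: PySem.List.pyRange (t.2 + 1) (lastv + 1) 1 :=
    PySem.List.pyRange_one_cons (by omega)
  have h3 : PySem.List.pyRange (t.2 + 1) (lastv + 1) 1 = T'.map Prod.snd := by
    rw [hpr] at h2
    injection h2 with h h'
    exact h'.symm
  rw [h3]
  simp only [pvInv_getD_eq_resolve]

theorem pvSegB_cons (chain : String) (inv : PySem.Dict Int Int) (v0 pk pv k v : Int)
    (rest : List (Int × Int)) :
    pvSegB chain inv v0 pk pv ((k, v) :: rest) =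
      if (k == pk + 1 && v == pv + 1) = true then pvSegB chain inv v0 k v rest
      else pvZoneB chain inv v0 pv :: pvSegB chain inv v k v rest := by
  rw [pvSegB]

theorem pvSegB_runs (chain : String) (inv : PySem.Dict Int Int) :
    ∀ (xs : List (Int × Int)) (pk pv v0 : Int),
      pvSegB chain inv v0 pk pv xs =
        pvZoneB chain inv v0 (((pvRunsCore pvLock (pk, pv) xs).1.getLastD (0, 0)).2)
          :: ((pvRunsCore pvLock (pk, pv) xs).2).map
            (fun T => pvZoneB chain inv ((T.headD (0, 0)).2) ((T.getLastD (0, 0)).2)) := by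
  intro xs
  induction xs with
  | nil => intro pk pv v0; rfl
  | cons x rest ih =>
    intro pk pv v0
    obtain ⟨k, v⟩ := x
    have hlk : pvLock (pk, pv) (k, v) = (k == pk + 1 && v == pv + 1) := by
      simp [pvLock, pvStepF, pvStepV]
    rw [pvSegB_cons, pvCore_cons, hlk]
    obtain ⟨t, ht⟩ := pvCore1_cons pvLock (k, v) rest
    by_cases h : (k == pk + 1 && v == pv + 1) = true
    · rw [if_pos h, if_pos h, ih k v v0]
      rw [ht]
      simp
    · rw [if_neg h, if_neg h, ih k v v]
      rw [ht]
      simp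

theorem pvZonesB_flat (chain : String) (ref : PySem.Dict Int Int) :
    pvZonesB chain ref = (pvRuns pvLock ref.items).map
      (fun T => pvZoneB chain (pvInv ref) ((T.headD (0, 0)).2) ((T.getLastD (0, 0)).2)) := by
  unfold pvZonesB
  cases h : ref.items with
  | nil => rfl
  | cons x rest =>
    obtain ⟨k, v⟩ := x
    show pvSegB chain (pvInv ref) v k v rest = _
    rw [pvSegB_runs chain (pvInv ref) rest k v v, pvRuns_cons]
    obtain ⟨t, ht⟩ := pvCore1_cons pvLock (k, v) rest
    rw [List.map_cons, ht]
    simp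

-- the per-chain equivalence
theorem pvZonesA_eq_zonesB (chain : String) (ref : PySem.Dict Int Int)
    (hnd : ref.keys.Nodup) (acc : List String) :
    pvZonesA chain ref acc = acc ++ pvZonesB chain ref := by
  rw [pvZonesA_flat, pvZonesB_flat]
  congr 1
  have hkeys : ref.keys = ref.items.map Prod.fst := rfl
  rw [hkeys, pvGet_range_eq, pvRuns_map, List.map_map, List.flatMap_map]
  rw [List.flatMap_congr (fun S hS => by
    simpa using pvBodyA_eq ref hnd chain S (by simpa using hS))]
  have hinner : ∀ S : List (Int × Int),
      (get_range (S.map Prod.snd)).flatMap (fun ur => [pvZA ref chain ur]) =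
        (pvRuns (fun a b : Int × Int => b.2 == a.2 + 1) S).flatMap
          (fun T => [pvZA ref chain (((T.map Prod.snd).headD 0), ((T.map Prod.snd).getLastD 0))]) := by
    intro S
    rw [pvGet_range_eq, pvRuns_map, List.map_map, List.flatMap_map]
    rfl
  simp only [hinner]
  rw [← List.flatMap_assoc, pvRuns_refine]
  have hpred : (fun a b : Int × Int => (b.1 == a.1 + 1) && (b.2 == a.2 + 1)) = pvLock := by
    funext a b
    simp [pvLock, pvStepF, pvStepV]
  rw [hpred]
  rw [← List.map_eq_flatMap]
  exact List.map_congr_left (pvZoneEq ref chain)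
-- fold the per-chain equivalence over c_dic
theorem pvTop (numbering_dic : List (String × List (Int × Int))) :
    ∀ (c_dic : List (String × List (String × List Int))) (acc : List String),
      c_dic.foldl (fun izone_l cp =>
        pvZonesA cp.1 (pvRefA numbering_dic cp.1 (PySem.List.pyGetD cp.2 0 ("", [])).2) izone_l) acc
      = c_dic.foldl (fun izone_l cp =>
          izone_l ++ pvZonesB cp.1 (pvRefB (((PySem.Dict.mk numbering_dic).get? cp.1).getD [])
            (PySem.List.pyGetD cp.2 0 ("", [])).2)) acc := by
  intro c_dic
  induction c_dic with
  | nil => intro acc; rfl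
  | cons cp rest ih =>
    intro acc
    rw [List.foldl_cons, List.foldl_cons]
    rw [pvRefA_eq_refB, pvZonesA_eq_zonesB _ _ (pvRefB_nodup _ _) acc]
    exact ih _

-- ===== VERDICT (by name: the statement is the Claim_ definition above) =====
theorem retrieve_izone_spec : Claim_equal_retrieve_izone := by
  intro c_dic numbering_dic _ _
  unfold Spec_retrieve_izone retrieve_izone retrieve_izone_alt
  exact pvTop numbering_dic c_dic []
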